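-- pv_equiv track=rewrite | github.com/Skyjaheim2/Sky-Labs | Algebra.py | getMaxPerfectPower
-- ===== SOURCE A (Python) =====
-- def getMaxPerfectPower(index: int, radicand: int):
--     n_powers = []
--     for i in range(1, 100):
--         # THIS WILL TAKE "i" 1-100 TO WHATEVER POWER WAS ENTERED
--         powers = i ** index
--         # THIS WILL APPEND THOSE POWERS THAT WERE CREATED TO THE "n_powers" LIST
--         n_powers.append(powers)
--
--     perfect_powers = []
--     for i in range(len(n_powers)):
--         # IF THE ROOT GOES INTO ONE OF THE LIST OF POWERS WITHOUT A REMAINDER, PRINT IT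
--         if radicand % n_powers[i] == 0:
--             perfect_powers.append(n_powers[i])
--
--     return perfect_powers[-1]
-- ===== SOURCE B (Python) =====
-- def getMaxPerfectPower(index: int, radicand: int):
--     for i in range(99, 0, -1):
--         p = i ** index
--         if radicand % p == 0:
--             return p
-- ===== Notes on version B (the rewrite author's own statement) =====
-- stated objective: simpler
-- what changed: Replaces A's two list-building passes (all 99 powers, then all dividing powers, then take the last) by a single downward loop i=99..1 that returns the first power dividing radicand, building no intermediate lists.
-- outside the precondition, e.g. on getMaxPerfectPower(-1, 6): A returns 0.015625, B returns 0.015625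
import Mathlib
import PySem

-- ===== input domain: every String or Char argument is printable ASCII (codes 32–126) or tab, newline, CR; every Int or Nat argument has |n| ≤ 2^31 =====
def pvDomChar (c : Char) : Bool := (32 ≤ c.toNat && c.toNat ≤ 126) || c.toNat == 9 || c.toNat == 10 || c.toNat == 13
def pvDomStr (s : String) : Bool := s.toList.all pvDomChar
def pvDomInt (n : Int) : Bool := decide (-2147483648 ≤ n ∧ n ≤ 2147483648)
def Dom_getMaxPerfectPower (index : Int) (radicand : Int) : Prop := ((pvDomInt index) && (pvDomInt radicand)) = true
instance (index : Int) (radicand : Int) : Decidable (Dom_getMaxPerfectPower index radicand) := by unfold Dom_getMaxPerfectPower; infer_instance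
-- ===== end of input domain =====

-- B replaces A's two list-building passes by a single downward loop that returns the first
-- power of i (i = 99..1) dividing radicand — no intermediate lists (objective: simpler).

-- ===== PORT A =====
-- i ** index with 0 ≤ index (Pre_) is i ^ index.toNat (for index < 0 Python yields a float).
def getMaxPerfectPower (index : Int) (radicand : Int) : Int :=
  let n_powers : List Int :=
    (PySem.List.pyRange 1 100 1).foldl (fun acc i => acc ++ [i ^ index.toNat]) []
  let perfect_powers : List Int :=
    (PySem.List.pyRange 0 (n_powers.length : Int) 1).foldl
      (fun acc i =>
        if PySem.Int.mod radicand (PySem.List.pyGetD n_powers i 0) = 0 then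
          acc ++ [PySem.List.pyGetD n_powers i 0]
        else acc) []
  -- perfect_powers[-1]; the list is never empty (the i = 1 row divides), so .getD 0 is unreachable
  (PySem.List.pyGet? perfect_powers (-1)).getD 0

-- ===== PORT B =====
-- the for-loop of Source B: scan i = 99, 98, …, 1, return the first dividing power.
-- The base case (Python's implicit 'return None' after the loop) is unreachable: i = 1 always divides.
def altLoop (index : Int) (radicand : Int) : List Int → Int
  | [] => 0
  | i :: rest =>
    let p := i ^ index.toNat
    if PySem.Int.mod radicand p = 0 then p else altLoop index radicand rest

def getMaxPerfectPower_alt (index : Int) (radicand : Int) : Int :=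
  altLoop index radicand (PySem.List.pyRange 99 0 (-1))

-- ===== PRECONDITION & SPEC =====
-- Pre_ excludes index < 0, on which Python's i ** index is a float and A returns a float, not an int.
def Pre_getMaxPerfectPower (index : Int) (radicand : Int) : Prop := 0 ≤ index
instance (index : Int) (radicand : Int) : Decidable (Pre_getMaxPerfectPower index radicand) := by unfold Pre_getMaxPerfectPower; infer_instance
def pvWitness_getMaxPerfectPower : Int × Int := (2, 36)

def Spec_getMaxPerfectPower (index : Int) (radicand : Int) (out : Int) : Prop := out = getMaxPerfectPower_alt index radicand
instance (index : Int) (radicand : Int) (out : Int) : Decidable (Spec_getMaxPerfectPower index radicand out) := by unfold Spec_getMaxPerfectPower; infer_instance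

-- ===== CLAIM (what is proved, stated in full; the proofs are below) =====
def Claim_equal_getMaxPerfectPower : Prop := ∀ (index : Int) (radicand : Int), Dom_getMaxPerfectPower index radicand → Pre_getMaxPerfectPower index radicand → Spec_getMaxPerfectPower index radicand (getMaxPerfectPower index radicand)

-- ===== LEMMAS AND PROOFS =====

-- B's loop over a list l is: the first power (in order of l) that divides, else 0.
theorem altLoop_eq_find (index radicand : Int) (l : List Int) :
    altLoop index radicand l =
      ((l.map (fun i => i ^ index.toNat)).find? (fun p => decide (PySem.Int.mod radicand p = 0))).getD 0 := by
  induction l with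
  | nil => rfl
  | cons i rest ih =>
      simp only [altLoop, List.map_cons, List.find?_cons]
      by_cases h : PySem.Int.mod radicand (i ^ index.toNat) = 0 <;> simp [h, ih]

theorem getMaxPerfectPower_spec' (index radicand : Int) :
    getMaxPerfectPower index radicand = getMaxPerfectPower_alt index radicand := by
  unfold getMaxPerfectPower getMaxPerfectPower_alt
  rw [altLoop_eq_find]
  simp only [PySem.List.foldl_append_singleton_eq_map, List.nil_append]
  rw [PySem.List.foldl_pyRange_zero_pyGetD' ((PySem.List.pyRange 1 100 1).map (fun i => i ^ index.toNat)) 0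
        (fun acc x => if PySem.Int.mod radicand x = 0 then acc ++ [x] else acc) []]
  rw [PySem.List.foldl_append_ite_eq_filter, List.nil_append, PySem.List.pyGet?_neg_one]
  rw [PySem.List.pyRange_neg_one_eq_reverse]
  norm_num

-- ===== VERDICT (by name: the statement is the Claim_ definition above) =====
theorem getMaxPerfectPower_spec : Claim_equal_getMaxPerfectPower := by
  intro index radicand _ _
  exact getMaxPerfectPower_spec' index radicand
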